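-- pv_equiv track=rewrite | github.com/KyleMathZeller/AOC-2023 | Day 14/AdventofCode14.py | findLoad
-- ===== SOURCE A (Python) =====
-- def findLoad(rockArray):
--     loadMax = len(rockArray)
--     totalLoad = 0
--     for num, line in enumerate(rockArray):
--         stonesPerLevel = 0
--         for char in line:
--             if char == "O":
--                 stonesPerLevel += 1
--         totalLoad += (stonesPerLevel * (loadMax - num))
--     return totalLoad
-- ===== SOURCE B (Python) =====
-- def findLoad(rockArray):
--     running = 0
--     total = 0
--     for line in rockArray:
--         running += line.count("O")
--         total += running
--     return total
-- ===== Notes on version B (the rewrite author's own statement) =====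
-- stated objective: simpler
-- what changed: Replaces the enumerate/len weighting (count * (loadMax - num) per row) by a single running prefix-count accumulator: each row adds its 'O' count to the running count, which is summed into the total, so the weight never appears explicitly.
import Mathlib
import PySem

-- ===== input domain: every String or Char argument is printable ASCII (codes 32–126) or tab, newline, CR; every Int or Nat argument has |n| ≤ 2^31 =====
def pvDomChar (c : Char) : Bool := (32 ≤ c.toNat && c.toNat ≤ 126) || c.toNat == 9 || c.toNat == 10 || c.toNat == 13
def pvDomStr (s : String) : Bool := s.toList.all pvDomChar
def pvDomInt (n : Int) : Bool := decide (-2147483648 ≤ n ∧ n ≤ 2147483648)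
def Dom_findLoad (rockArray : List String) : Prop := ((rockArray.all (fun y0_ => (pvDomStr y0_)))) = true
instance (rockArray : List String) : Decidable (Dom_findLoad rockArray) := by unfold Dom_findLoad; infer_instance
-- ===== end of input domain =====

-- B replaces A's enumerate/len weighting by a running prefix-count accumulator summed into the total (same values, simpler decomposition; no speed claim).

-- ===== PORT A =====
-- literal port of Source A: enumerate with index, per-line char loop, weight (loadMax - num)
def findLoad (rockArray : List String) : Int :=
  let loadMax : Int := rockArray.length
  (PySem.List.enumerate rockArray).foldl
    (fun totalLoad p =>
      let stonesPerLevel : Int :=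
        p.2.toList.foldl (fun s ch => if ch == 'O' then s + 1 else s) 0
      totalLoad + stonesPerLevel * (loadMax - p.1))
    0

-- ===== PORT B =====
-- literal port of Source B: state (running, total); running += line.count("O"); total += running
def findLoad_alt (rockArray : List String) : Int :=
  (rockArray.foldl
    (fun st line =>
      (st.1 + (PySem.Str.count line "O" : Int),
       st.2 + (st.1 + (PySem.Str.count line "O" : Int))))
    ((0 : Int), (0 : Int))).2

-- ===== PRECONDITION & SPEC =====
def Spec_findLoad (rockArray : List String) (out : Int) : Prop := out = findLoad_alt rockArray
instance (rockArray : List String) (out : Int) : Decidable (Spec_findLoad rockArray out) := by unfold Spec_findLoad; infer_instance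

-- ===== CLAIM (what is proved, stated in full; the proofs are below) =====
def Claim_equal_findLoad : Prop := ∀ (rockArray : List String), Dom_findLoad rockArray → Spec_findLoad rockArray (findLoad rockArray)

-- ===== LEMMAS AND PROOFS =====

-- number of 'O' characters in a line, as an Int
def cntO (s : String) : Int := (s.toList.count 'O' : Int)

-- s.count("O") for the single character "O" is the character count
theorem chars_count_go_singleton (c : Char) :
    ∀ (l : List Char) (fuel acc : Nat), l.length ≤ fuel →
      PySem.Chars.count.go [c] fuel l acc = acc + l.count c := by
  intro l
  induction l with
  | nil =>
      intro fuel acc _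
      cases fuel <;> simp [PySem.Chars.count.go]
  | cons h t ih =>
      intro fuel acc hle
      cases fuel with
      | zero => simp at hle
      | succ f =>
        have hf : t.length ≤ f := by simpa using hle
        by_cases hc : h = c
        · subst hc
          simp [PySem.Chars.count.go, List.isPrefixOf, ih _ _ hf]
          omega
        · have : (c == h) = false := by simp; exact fun e => hc e.symm
          simp [PySem.Chars.count.go, List.isPrefixOf, this, ih _ _ hf, hc]

theorem str_count_O (s : String) : (PySem.Str.count s "O" : Int) = cntO s := by
  have h : PySem.Str.count s "O" = s.toList.count 'O' := by
    rw [PySem.Str.count_eq]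
    have e : "O".toList = ['O'] := rfl
    rw [e, PySem.Chars.count]
    simpa using chars_count_go_singleton 'O' s.toList s.toList.length 0 le_rfl
  rw [h]; rfl

-- A's total written recursively: G xs m = cntO x₀ * m + cntO x₁ * (m-1) + …
def aSum : List String → Int → Int
  | [], _ => 0
  | x :: xs, m => cntO x * m + aSum xs (m - 1)

-- B's total written recursively: prefix sums starting from running count r
def bSum : List String → Int → Int
  | [], _ => 0
  | x :: xs, r => (r + cntO x) + bSum xs (r + cntO x)

theorem aFold_eq (xs : List String) (n : Int) :
    ∀ (s acc : Int),
      (PySem.List.enumerate xs s).foldl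
          (fun t (p : Int × String) => t + cntO p.2 * (n - p.1)) acc
        = acc + aSum xs (n - s) := by
  induction xs with
  | nil => intro s acc; simp [PySem.List.enumerate_nil, aSum]
  | cons x xs ih =>
      intro s acc
      rw [PySem.List.enumerate_cons]
      simp only [List.foldl_cons, aSum, ih (s + 1)]
      ring_nf

theorem bFold_eq (xs : List String) :
    ∀ (r t : Int),
      (xs.foldl
          (fun (st : Int × Int) line =>
            (st.1 + cntO line, st.2 + (st.1 + cntO line)))
          (r, t)).2
        = t + bSum xs r := by
  induction xs with
  | nil => intro r t; simp [bSum]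
  | cons x xs ih =>
      intro r t
      simp only [List.foldl_cons, bSum, ih]
      ring

theorem bSum_eq_aSum (xs : List String) :
    ∀ (r : Int), bSum xs r = r * xs.length + aSum xs xs.length := by
  induction xs with
  | nil => intro r; simp [bSum, aSum]
  | cons x xs ih =>
      intro r
      have h1 : ((xs.length + 1 : Nat) : Int) - 1 = (xs.length : Int) := by push_cast; ring
      simp only [bSum, aSum, List.length_cons, h1, ih]
      push_cast
      ring

-- ===== VERDICT (by name: the statement is the Claim_ definition above) =====
theorem findLoad_spec : Claim_equal_findLoad := by
  intro xs _
  unfold Spec_findLoad findLoad findLoad_alt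
  have hA :
      (PySem.List.enumerate xs).foldl
          (fun t (p : Int × String) =>
            t + (p.2.toList.foldl (fun s ch => if ch == 'O' then s + 1 else s) 0)
              * ((xs.length : Int) - p.1)) 0
        = aSum xs xs.length := by
    have hcongr :
        (PySem.List.enumerate xs).foldl
            (fun t (p : Int × String) =>
              t + (p.2.toList.foldl (fun s ch => if ch == 'O' then s + 1 else s) 0)
                * ((xs.length : Int) - p.1)) 0
          = (PySem.List.enumerate xs).foldl
              (fun t (p : Int × String) => t + cntO p.2 * ((xs.length : Int) - p.1)) 0 := by
      apply PySem.List.foldl_congr_mem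
      intro acc p _
      rw [PySem.List.foldl_beq_add_one]
      simp [cntO]
    rw [hcongr, aFold_eq xs (xs.length : Int) 0 0]
    simp
  have hB := bFold_eq xs 0 0
  simp only [str_count_O, hA, hB, bSum_eq_aSum xs 0]
  ring
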